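-- pv_equiv track=rewrite | github.com/HorangApple/TIL | Algorithm/SWEA/6일차/4865. [파이썬 SW 문제해결 기본] 3일차 - 글자수.py | solution
-- ===== SOURCE A (Python) =====
-- def solution(str1,str2) :
--     str1len=len(str1)
--     # '문자:index'형식으로 딕셔너리 생성
--     str1dict = {str1[i] : i for i in range(str1len)}
--     cnt = [0 for i in range(str1len)]
--     for i in str2:
--         # str2의 문자가 str1에도 있는 문자이면 해당하는 index로 cnt에 +1씩 저장
--         if i in str1:
--             cnt[str1dict[i]] +=1
--     maxnum =0
--     # 가장 많이 나타난 수를 뽑음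
--     for i in cnt :
--         if maxnum < i :
--             maxnum = i
--     return maxnum
-- ===== SOURCE B (Python) =====
-- def solution(str1, str2):
--     return max((str2.count(c) for c in set(str1)), default=0)
-- ===== Notes on version B (the rewrite author's own statement) =====
-- stated objective: simpler
-- what changed: Replaced A's char->index dict, positional tally list and running-max loop by a one-liner: rescan str2 with str2.count(c) for each distinct character of str1 and take max(..., default=0).
import Mathlib
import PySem

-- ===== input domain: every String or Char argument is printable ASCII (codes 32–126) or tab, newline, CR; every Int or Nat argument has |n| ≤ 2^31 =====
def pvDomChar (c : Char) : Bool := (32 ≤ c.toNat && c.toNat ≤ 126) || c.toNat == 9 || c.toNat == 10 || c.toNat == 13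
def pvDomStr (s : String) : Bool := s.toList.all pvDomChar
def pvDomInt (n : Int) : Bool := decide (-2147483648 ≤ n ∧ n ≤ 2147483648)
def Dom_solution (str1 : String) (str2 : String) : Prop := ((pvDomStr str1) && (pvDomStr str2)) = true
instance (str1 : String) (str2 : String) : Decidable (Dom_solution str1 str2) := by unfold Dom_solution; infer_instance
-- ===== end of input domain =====

-- B drops A's index-table/tally machinery: it rescans str2 once per distinct character of str1 and takes
-- max(..., default=0) (objective: simpler; no speed claim).

-- ===== PORT A =====
-- A builds {str1[i]: i} over range(len(str1)), tallies str2's characters into a positional cnt list,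
-- then takes a running max.  The comprehension index i is always in range and cnt's index str1dict[i]
-- is always present / in range (the lookup is guarded by 'i in str1'), so pyGetD/pySetD and Dict.getD
-- are exact here; 'i in str1' for the single character i is PySem.Chars.isIn [i] str1.
def solution (str1 : String) (str2 : String) : Int :=
  let s1 := str1.toList
  let n : Int := (s1.length : Int)
  let str1dict : PySem.Dict Char Int :=
    (PySem.List.pyRange 0 n 1).foldl (fun d i => d.insert (PySem.List.pyGetD s1 i ' ') i) PySem.Dict.empty
  let cnt0 : List Int := (PySem.List.pyRange 0 n 1).map (fun _ => (0 : Int))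
  let cnt := str2.toList.foldl (fun cnt c =>
      if PySem.Chars.isIn [c] s1 then
        PySem.List.pySetD cnt (str1dict.getD c 0) (PySem.List.pyGetD cnt (str1dict.getD c 0) 0 + 1)
      else cnt) cnt0
  cnt.foldl (fun m x => if m < x then x else m) 0

-- ===== PORT B =====
-- max((str2.count(c) for c in set(str1)), default=0); max(..., default) is PySem.List.maxD, whose
-- result does not depend on the set's iteration order.
def solution_alt (str1 : String) (str2 : String) : Int :=
  PySem.List.maxD
    ((PySem.Set.ofList str1.toList).map (fun c => (PySem.Chars.count str2.toList [c] : Int)))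
    (fun x => x) 0

-- ===== PRECONDITION & SPEC =====
def Spec_solution (str1 : String) (str2 : String) (out : Int) : Prop := out = solution_alt str1 str2
instance (str1 : String) (str2 : String) (out : Int) : Decidable (Spec_solution str1 str2 out) := by unfold Spec_solution; infer_instance

-- ===== CLAIM (what is proved, stated in full; the proofs are below) =====
def Claim_equal_solution : Prop := ∀ (str1 : String) (str2 : String), Dom_solution str1 str2 → Spec_solution str1 str2 (solution str1 str2)

-- ===== LEMMAS AND PROOFS =====

lemma count_go_singleton (c : Char) (fuel : Nat) (l : List Char) (acc : Nat)
    (h : l.length ≤ fuel) : PySem.Chars.count.go [c] fuel l acc = acc + l.count c := by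
  induction fuel generalizing l acc with
  | zero =>
    have : l = [] := by cases l <;> simp_all
    subst this; simp [PySem.Chars.count.go]
  | succ fuel ih =>
    cases l with
    | nil => simp [PySem.Chars.count.go]
    | cons a t =>
      simp only [PySem.Chars.count.go]
      by_cases hc : c = a
      · subst hc
        have hp : [c].isPrefixOf (c :: t) = true := by simp [List.isPrefixOf]
        simp [hp, ih t (acc + 1) (by simpa using Nat.le_of_succ_le_succ (by simpa using h))]
        omega
      · have hp : [c].isPrefixOf (a :: t) = false := by
          simp [List.isPrefixOf]; exact fun hh => hc (by simpa using hh)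
        simp [hp, ih t acc (by simpa using Nat.le_of_succ_le_succ (by simpa using h)), List.count_cons]
        intro hh; exact absurd hh.symm hc

lemma count_singleton (s : List Char) (c : Char) :
    PySem.Chars.count s [c] = s.count c := by
  simp [PySem.Chars.count, count_go_singleton c s.length s 0 le_rfl]

lemma isIn_singleton (c : Char) (s : List Char) :
    PySem.Chars.isIn [c] s = true ↔ c ∈ s := by
  rw [PySem.Chars.isIn_iff_infix]
  constructor
  · intro h; exact h.mem (by simp)
  · intro h
    obtain ⟨pre, suf, rfl⟩ := List.mem_iff_append.mp h
    exact ⟨pre, suf, by simp⟩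

lemma dict_fold_get? (ps : List (Int × Char)) (d0 : PySem.Dict Char Int) (c : Char) (j : Int)
    (h : (ps.foldl (fun d p => d.insert p.2 p.1) d0).get? c = some j) :
    (j, c) ∈ ps ∨ d0.get? c = some j := by
  induction ps generalizing d0 with
  | nil => exact Or.inr h
  | cons p t ih =>
    simp only [List.foldl_cons] at h
    rcases ih _ h with h1 | h2
    · exact Or.inl (List.mem_cons_of_mem _ h1)
    · rw [PySem.Dict.get?_insert] at h2
      split_ifs at h2 with hc
      · obtain ⟨a, b⟩ := p
        simp only [Option.some.injEq] at h2
        subst hc h2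
        exact Or.inl List.mem_cons_self
      · exact Or.inr h2

lemma cnt_fold_length (s1 : List Char) (d : PySem.Dict Char Int) (l : List Char) (cnt : List Int) :
    (l.foldl (fun cnt c =>
      if PySem.Chars.isIn [c] s1 then
        PySem.List.pySetD cnt (d.getD c 0) (PySem.List.pyGetD cnt (d.getD c 0) 0 + 1)
      else cnt) cnt).length = cnt.length := by
  induction l generalizing cnt with
  | nil => rfl
  | cons c t ih =>
    simp only [List.foldl_cons]
    split
    · rw [ih, PySem.List.length_pySetD]
    · exact ih cnt

lemma cnt_fold_getElem (s1 : List Char) (d : PySem.Dict Char Int) (n : Nat)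
    (Hd : ∀ c ∈ s1, ∃ k : Nat, d.get? c = some (k : Int) ∧ k < n)
    (l : List Char) (cnt : List Int) (hlen : cnt.length = n) (j : Nat) (hj : j < n) :
    (l.foldl (fun cnt c =>
      if PySem.Chars.isIn [c] s1 then
        PySem.List.pySetD cnt (d.getD c 0) (PySem.List.pyGetD cnt (d.getD c 0) 0 + 1)
      else cnt) cnt)[j]'(by rw [cnt_fold_length, hlen]; exact hj)
    = cnt[j]'(by rw [hlen]; exact hj)
      + (l.countP (fun c => decide (c ∈ s1) && (d.getD c 0 == (j : Int))) : Int) := by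
  induction l generalizing cnt with
  | nil => simp
  | cons c t ih =>
    simp only [List.foldl_cons, List.countP_cons]
    by_cases hmem : c ∈ s1
    · have hin : PySem.Chars.isIn [c] s1 = true := (isIn_singleton c s1).mpr hmem
      obtain ⟨k, hk, hkn⟩ := Hd c hmem
      have hgd : d.getD c 0 = (k : Int) := by rw [PySem.Dict.getD_eq_get?_getD, hk]; rfl
      simp only [hin, if_true, hgd]
      have hset : PySem.List.pySetD cnt ((k : Nat) : Int) (PySem.List.pyGetD cnt ((k : Nat) : Int) 0 + 1)
          = cnt.set k (cnt[k]'(by omega) + 1) := by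
        rw [PySem.List.pySetD_natCast, PySem.List.pyGetD_natCast]
        congr 1
        rw [List.getD_eq_getElem?_getD, List.getElem?_eq_getElem (by omega)]
        rfl
      simp only [hset]
      rw [ih (cnt.set k (cnt[k]'(by omega) + 1)) (by simp [hlen])]
      have hget : (cnt.set k (cnt[k]'(by omega) + 1))[j]'(by simp [hlen]; exact hj)
          = if k = j then cnt[k]'(by omega) + 1 else cnt[j]'(by omega) := by
        rw [List.getElem_set]
      simp only [hget]
      by_cases hkj : k = j
      · subst hkj
        simp [hmem]
        omega
      · have : ((k : Int) == (j : Int)) = false := by simp; omega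
        simp [hmem, this, hkj]
    · have hin : PySem.Chars.isIn [c] s1 = false := by
        rw [PySem.Chars.isIn_eq_false_iff]
        intro hinf
        exact hmem (hinf.mem (by simp))
      simp only [hin, Bool.false_eq_true, if_false]
      rw [ih cnt hlen]
      simp [hmem]

lemma solution_eq_alt (str1 str2 : String) : solution str1 str2 = solution_alt str1 str2 := by
  unfold solution solution_alt
  dsimp only
  set s1 := str1.toList with hs1
  set s2 := str2.toList with hs2
  set d : PySem.Dict Char Int :=
    (PySem.List.pyRange 0 (s1.length : Int) 1).foldl (fun d i => d.insert (PySem.List.pyGetD s1 i ' ') i) PySem.Dict.empty with hd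
  have hdE : d = (PySem.List.enumerate s1 0).foldl (fun d p => d.insert p.2 p.1) PySem.Dict.empty := by
    rw [PySem.List.enumerate_eq_map_pyRange s1 ' ', List.foldl_map]
    simp only [PySem.List.len]
    exact hd
  have hL1 : ∀ (c : Char) (jj : Int), d.get? c = some jj →
      ∃ (k : Nat) (hk : k < s1.length), jj = (k : Int) ∧ s1[k]'hk = c := by
    intro c jj h
    rw [hdE] at h
    rcases dict_fold_get? _ _ _ _ h with h1 | h2
    · rw [PySem.List.mem_enumerate_iff] at h1
      obtain ⟨k, hk, hp⟩ := h1
      refine ⟨k, hk, ?_, ?_⟩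
      · simpa using congrArg Prod.fst hp
      · have := congrArg Prod.snd hp
        simp at this
        exact this.symm
    · rw [PySem.Dict.get?_empty] at h2
      cases h2
  have hL2 : ∀ c ∈ s1, ∃ k : Nat, d.get? c = some (k : Int) ∧ k < s1.length := by
    intro c hc
    have hkeys : d.keys = PySem.Set.ofList s1 := by
      rw [hdE]
      exact (PySem.Dict.keys_foldl_insert_key (PySem.List.enumerate s1 0) (fun p => p.2)
        (fun _ p => p.1) PySem.Dict.empty).trans
        (by rw [PySem.Dict.keys_empty, PySem.Set.update_nil_left, PySem.List.map_snd_enumerate])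
    have hmemk : c ∈ d.keys := by rw [hkeys]; exact (PySem.Set.mem_ofList _ _).mpr hc
    cases hsome : d.get? c with
    | none => exact absurd ((PySem.Dict.get?_eq_none_iff_not_mem_keys d c).mp hsome) (by simpa using hmemk)
    | some jj =>
      obtain ⟨k, hkn, rfl, _⟩ := hL1 c jj hsome
      exact ⟨k, rfl, hkn⟩
  set cnt0 : List Int := (PySem.List.pyRange 0 (s1.length : Int) 1).map (fun _ => (0 : Int)) with hcnt0
  have hlen0 : cnt0.length = s1.length := by simp [hcnt0, PySem.List.length_pyRange_one]
  have hzero : ∀ (j : Nat) (hj : j < cnt0.length), cnt0[j]'hj = 0 := by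
    intro j hj
    simp [hcnt0]
  set cntF := s2.foldl (fun cnt c =>
      if PySem.Chars.isIn [c] s1 then
        PySem.List.pySetD cnt (d.getD c 0) (PySem.List.pyGetD cnt (d.getD c 0) 0 + 1)
      else cnt) cnt0 with hcntF
  have hlenF : cntF.length = s1.length := by rw [hcntF, cnt_fold_length, hlen0]
  have hcore : ∀ (j : Nat) (hj : j < s1.length),
      cntF[j]'(by omega) =
        if d.get? (s1[j]'hj) = some (j : Int) then (s2.count (s1[j]'hj) : Int) else 0 := by
    intro j hj
    have h0 := cnt_fold_getElem s1 d s1.length hL2 s2 cnt0 hlen0 j hj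
    have hFj : cntF[j]'(by omega) = cnt0[j]'(by omega)
        + (s2.countP (fun c => decide (c ∈ s1) && (d.getD c 0 == (j : Int))) : Int) := h0
    rw [hFj, hzero j (by omega), zero_add]
    by_cases hsel : d.get? (s1[j]'hj) = some (j : Int)
    · rw [if_pos hsel]
      have hcong : s2.countP (fun c => decide (c ∈ s1) && (d.getD c 0 == (j : Int)))
          = s2.countP (fun c => c == s1[j]'hj) := by
        apply List.countP_congr
        intro c _
        simp only [Bool.and_eq_true, decide_eq_true_eq, beq_iff_eq]
        constructor
        · rintro ⟨hcs1, hgd⟩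
          obtain ⟨k, hk, hkn⟩ := hL2 c hcs1
          have hgdv : d.getD c 0 = (k : Int) := by rw [PySem.Dict.getD_eq_get?_getD, hk]; rfl
          rw [hgdv] at hgd
          have hkj : k = j := by exact_mod_cast hgd
          subst hkj
          obtain ⟨k', hk', hjk', hc'⟩ := hL1 c _ hk
          have hkk : k' = k := by exact_mod_cast hjk'.symm
          subst hkk
          exact hc'.symm
        · rintro rfl
          refine ⟨List.getElem_mem _, ?_⟩
          rw [PySem.Dict.getD_eq_get?_getD, hsel]; rfl
      rw [hcong, ← List.count_eq_countP]
    · rw [if_neg hsel]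
      have hz : s2.countP (fun c => decide (c ∈ s1) && (d.getD c 0 == (j : Int))) = 0 := by
        rw [List.countP_eq_zero]
        intro c _
        simp only [Bool.and_eq_true, decide_eq_true_eq, beq_iff_eq, not_and]
        intro hcs1 hgd
        obtain ⟨k, hk, hkn⟩ := hL2 c hcs1
        have hgdv : d.getD c 0 = (k : Int) := by rw [PySem.Dict.getD_eq_get?_getD, hk]; rfl
        rw [hgdv] at hgd
        have hkj : k = j := by exact_mod_cast hgd
        subst hkj
        obtain ⟨k', hk', hjk', hc'⟩ := hL1 c _ hk
        have hkk : k' = k := by exact_mod_cast hjk'.symm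
        subst hkk
        rw [← hc'] at hk
        exact hsel hk
      rw [hz]
      rfl
  have hifmax : (fun (m x : Int) => if m < x then x else m) = (fun (m x : Int) => max m x) := by
    funext m x
    rw [max_def]
    split_ifs <;> omega
  rw [hifmax]
  have hcounts : (PySem.Set.ofList s1).map (fun c => (PySem.Chars.count s2 [c] : Int))
      = (PySem.Set.ofList s1).map (fun c => (s2.count c : Int)) := by
    apply List.map_congr_left
    intro c _
    rw [count_singleton]
  rw [hcounts]
  set counts := (PySem.Set.ofList s1).map (fun c => (s2.count c : Int)) with hcounts2
  have hBmax : PySem.List.maxD counts (fun x => x) 0 = counts.foldl max 0 := by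
    cases hc : counts with
    | nil => simp [PySem.List.maxD, PySem.List.max?]
    | cons x t =>
      have hx : 0 ≤ x := by
        have hxm : x ∈ counts := by rw [hc]; exact List.mem_cons_self
        rw [hcounts2] at hxm
        obtain ⟨c, _, rfl⟩ := List.mem_map.mp hxm
        positivity
      simp only [PySem.List.maxD, PySem.List.max?_id_cons, Option.getD_some]
      rw [List.foldl_cons]
      congr 1
      omega
  rw [hBmax]
  apply le_antisymm
  · rcases PySem.List.foldl_max_mem cntF 0 with h | h
    · rw [h]; exact (PySem.List.le_foldl_max counts 0).1
    · obtain ⟨j, hj, hv⟩ := List.mem_iff_getElem.mp h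
      have hj' : j < s1.length := by omega
      rw [← hv]
      have hc := hcore j hj'
      by_cases hsel : d.get? (s1[j]'hj') = some (j : Int)
      · rw [if_pos hsel] at hc
        rw [hc]
        apply (PySem.List.le_foldl_max counts 0).2
        rw [hcounts2]
        exact List.mem_map.mpr ⟨s1[j]'hj', (PySem.Set.mem_ofList _ _).mpr (List.getElem_mem _), rfl⟩
      · rw [if_neg hsel] at hc
        rw [hc]
        exact (PySem.List.le_foldl_max counts 0).1
  · rcases PySem.List.foldl_max_mem counts 0 with h | h
    · rw [h]; exact (PySem.List.le_foldl_max cntF 0).1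
    · rw [hcounts2] at h
      obtain ⟨c, hcmem, hceq⟩ := List.mem_map.mp h
      have hgoal : List.foldl max 0 counts = ((List.count c s2 : Nat) : Int) := hceq.symm
      rw [hgoal]
      have hcs1 : c ∈ s1 := (PySem.Set.mem_ofList _ _).mp hcmem
      obtain ⟨k, hk, hkn⟩ := hL2 c hcs1
      obtain ⟨k', hk'n, hjk', hc'⟩ := hL1 c _ hk
      have hkk : k' = k := by exact_mod_cast hjk'.symm
      subst hkk
      have hsel : d.get? (s1[k']'hk'n) = some ((k' : Nat) : Int) := by
        rw [hc']
        exact hk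
      have hcr := hcore k' hk'n
      rw [if_pos hsel, hc'] at hcr
      apply (PySem.List.le_foldl_max cntF 0).2
      rw [← hcr]
      exact List.getElem_mem _

-- ===== VERDICT (by name: the statement is the Claim_ definition above) =====
theorem solution_spec : Claim_equal_solution := by
  intro str1 str2 _
  unfold Spec_solution
  exact solution_eq_alt str1 str2
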